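-- pv_equiv track=rewrite | github.com/pypi-data/pypi-mirror-350 | packages/fmcore/fmcore-0.1.6.dev40.tar.gz/fmcore-0.1.6.dev40/tests/local/utk_test.py | insert_additional_rule
-- ===== SOURCE A (Python) =====
-- def insert_additional_rule(sections, additional_rule_text):
--     # Find the last section starting with "Rules"
--     for i in range(len(sections) - 1, -1, -1):
--         title, body = sections[i]
--         if title.startswith("Rules"):
--             # Insert the additional rule at the end
--             body = body.rstrip()
--             body += f"\n\nAdditional Rule:\n{additional_rule_text}"
--             sections[i] = (title, body)
--             break
--     return sections
-- ===== SOURCE B (Python) =====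
-- def insert_additional_rule(sections, additional_rule_text):
--     # Rebuild the whole list back-to-front with a done flag: fold over the
--     # reversed list, patching the first match seen (= last overall), then
--     # write the rebuilt content back into the same list object.
--     out = []
--     done = False
--     for title, body in reversed(sections):
--         if done or not title.startswith("Rules"):
--             out.append((title, body))
--         else:
--             out.append((title, body.rstrip() + "\n\nAdditional Rule:\n" + additional_rule_text))
--             done = True
--     out.reverse()
--     sections[:] = out
--     return sections
-- ===== Notes on version B (the rewrite author's own statement) =====
-- stated objective: alternative
-- what changed: Instead of A's backward index loop that assigns one element in place, B rebuilds the entire list by folding over the reversed list with a done flag (patching the first match seen, i.e. the last overall), reverses the rebuilt list and writes it back wholesale; no indices are used at all.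
import Mathlib
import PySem

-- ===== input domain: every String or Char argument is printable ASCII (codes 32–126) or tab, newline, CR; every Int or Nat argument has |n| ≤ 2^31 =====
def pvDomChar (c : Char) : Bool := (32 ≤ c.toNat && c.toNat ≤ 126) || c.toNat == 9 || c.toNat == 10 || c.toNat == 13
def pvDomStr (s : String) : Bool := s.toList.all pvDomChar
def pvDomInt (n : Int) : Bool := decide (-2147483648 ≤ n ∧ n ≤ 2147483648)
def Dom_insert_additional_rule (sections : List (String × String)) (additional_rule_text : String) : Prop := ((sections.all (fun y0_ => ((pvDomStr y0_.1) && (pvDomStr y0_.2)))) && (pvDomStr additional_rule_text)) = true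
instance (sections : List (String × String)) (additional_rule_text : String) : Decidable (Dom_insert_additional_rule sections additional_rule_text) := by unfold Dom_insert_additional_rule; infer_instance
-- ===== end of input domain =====

-- B rebuilds the whole list by folding over the reversed list with a done flag and writes it
-- back wholesale, instead of A's backward index loop assigning one element; equivalence is
-- about the returned list (both Pythons also leave the argument list with the same content).


-- ===== PORT A =====
-- the f-string body both Pythons build: body.rstrip() + "\n\nAdditional Rule:\n" + text
def pvNewBody (body additional_rule_text : String) : String :=
  String.ofList (PySem.Chars.rstrip body.toList ++ "\n\nAdditional Rule:\n".toList ++ additional_rule_text.toList)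

-- for i in range(len(sections)-1, -1, -1): … break   (argument k = i + 1)
def pvGoA (sections : List (String × String)) (additional_rule_text : String) : Nat → List (String × String)
  | 0 => sections
  | k + 1 =>
    let p := PySem.List.pyGetD sections (k : Int) ("", "")
    if PySem.Str.startswith p.1 "Rules" then
      PySem.List.pySetD sections (k : Int) (p.1, pvNewBody p.2 additional_rule_text)
    else pvGoA sections additional_rule_text k

def insert_additional_rule (sections : List (String × String)) (additional_rule_text : String) : List (String × String) :=
  pvGoA sections additional_rule_text sections.length

-- ===== PORT B =====
-- loop body: out.append(…) with the done flag (state = (out, done))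
def pvStepB (additional_rule_text : String) (st : List (String × String) × Bool)
    (p : String × String) : List (String × String) × Bool :=
  if st.2 || !(PySem.Str.startswith p.1 "Rules") then (st.1 ++ [p], st.2)
  else (st.1 ++ [(p.1, pvNewBody p.2 additional_rule_text)], true)

def insert_additional_rule_alt (sections : List (String × String)) (additional_rule_text : String) : List (String × String) :=
  let st := sections.reverse.foldl (pvStepB additional_rule_text) ([], false)
  st.1.reverse

-- ===== PRECONDITION & SPEC =====
def Spec_insert_additional_rule (sections : List (String × String)) (additional_rule_text : String) (out : List (String × String)) : Prop := out = insert_additional_rule_alt sections additional_rule_text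
instance (sections : List (String × String)) (additional_rule_text : String) (out : List (String × String)) : Decidable (Spec_insert_additional_rule sections additional_rule_text out) := by unfold Spec_insert_additional_rule; infer_instance

-- ===== CLAIM (what is proved, stated in full; the proofs are below) =====
def Claim_equal_insert_additional_rule : Prop := ∀ (sections : List (String × String)) (additional_rule_text : String), Dom_insert_additional_rule sections additional_rule_text → Spec_insert_additional_rule sections additional_rule_text (insert_additional_rule sections additional_rule_text)

-- ===== LEMMAS AND PROOFS =====

-- index (from the front) of the last section whose title starts with "Rules"
def pvLastIdx : List (String × String) → Option Nat
  | [] => none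
  | x :: xs =>
    match pvLastIdx xs with
    | some j => some (j + 1)
    | none => if PySem.Str.startswith x.1 "Rules" then some 0 else none

-- common characterization both ports are reduced to
def pvCharF (t : String) (xs : List (String × String)) : List (String × String) :=
  match pvLastIdx xs with
  | some j => xs.set j ((xs.getD j ("", "")).1, pvNewBody (xs.getD j ("", "")).2 t)
  | none => xs

theorem pvLastIdx_append_singleton (xs : List (String × String)) (y : String × String) :
    pvLastIdx (xs ++ [y]) =
      if PySem.Str.startswith y.1 "Rules" then some xs.length else pvLastIdx xs := by
  induction xs with
  | nil => simp only [List.nil_append, pvLastIdx]; split <;> rfl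
  | cons x xs ih =>
    simp only [List.cons_append, pvLastIdx, ih]
    cases PySem.Str.startswith y.1 "Rules" with
    | true => simp
    | false => simp

theorem pvLastIdx_lt (xs : List (String × String)) (j : Nat) (h : pvLastIdx xs = some j) :
    j < xs.length := by
  induction xs generalizing j with
  | nil => simp [pvLastIdx] at h
  | cons x xs ih =>
    cases hL : pvLastIdx xs with
    | some k =>
      simp only [pvLastIdx, hL, Option.some.injEq] at h
      have := ih k hL
      simp only [List.length_cons]
      omega
    | none =>
      simp [pvLastIdx, hL] at h
      obtain ⟨-, h2⟩ := h
      cases h2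
      simp

-- ---- A side: pvGoA computes pvCharF ----
theorem pvGoA_eq (sections : List (String × String)) (t : String) :
    ∀ k, k ≤ sections.length →
      pvGoA sections t k =
        match pvLastIdx (sections.take k) with
        | some j =>
            PySem.List.pySetD sections (j : Int)
              ((sections.getD j ("", "")).1, pvNewBody (sections.getD j ("", "")).2 t)
        | none => sections := by
  intro k
  induction k with
  | zero => intro _; simp [pvGoA, pvLastIdx]
  | succ k ih =>
    intro hk
    have hk' : k < sections.length := by omega
    have htake : sections.take (k + 1) = sections.take k ++ [sections[k]] := by
      rw [List.take_add_one, List.getElem?_eq_getElem hk']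
      rfl
    rw [htake, pvLastIdx_append_singleton]
    have hget : PySem.List.pyGetD sections (k : Int) ("", "") = sections[k] := by
      rw [PySem.List.pyGetD_natCast]
      simp [List.getD_eq_getElem?_getD, List.getElem?_eq_getElem hk']
    simp only [pvGoA, hget]
    by_cases h : PySem.Str.startswith (sections[k]).1 "Rules" = true
    · simp only [h, if_true, List.length_take, Nat.min_eq_left (Nat.le_of_lt hk')]
      have : sections.getD k ("", "") = sections[k] := by
        simp [List.getD_eq_getElem?_getD, List.getElem?_eq_getElem hk']
      rw [this]
    · simp only [h, if_false, Bool.false_eq_true]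
      exact ih (Nat.le_of_lt hk')

-- ---- B side ----
-- pure recursive description of B's fold: patch the FIRST match, thread the done flag
def pvPatch (t : String) : Bool → List (String × String) → List (String × String) × Bool
  | d, [] => ([], d)
  | d, p :: ps =>
    if d || !(PySem.Str.startswith p.1 "Rules") then
      let r := pvPatch t d ps; (p :: r.1, r.2)
    else
      let r := pvPatch t true ps; ((p.1, pvNewBody p.2 t) :: r.1, r.2)

theorem pvPatch_true (t : String) (l : List (String × String)) : pvPatch t true l = (l, true) := by
  induction l with
  | nil => rfl
  | cons p ps ih => simp [pvPatch, ih]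

theorem foldl_eq_pvPatch (t : String) (l : List (String × String)) :
    ∀ acc d, l.foldl (pvStepB t) (acc, d) = (acc ++ (pvPatch t d l).1, (pvPatch t d l).2) := by
  induction l with
  | nil => intro acc d; simp [pvPatch]
  | cons p ps ih =>
    intro acc d
    cases d with
    | true => simp [List.foldl_cons, pvStepB, pvPatch, ih, pvPatch_true]
    | false =>
      cases h : PySem.Chars.startswith p.1.toList ['R', 'u', 'l', 'e', 's'] with
      | true => simp [List.foldl_cons, pvStepB, pvPatch, h, ih, pvPatch_true]
      | false => simp [List.foldl_cons, pvStepB, pvPatch, h, ih]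

theorem pvPatch_rev_char (t : String) (xs : List (String × String)) :
    (pvPatch t false xs.reverse).1.reverse = pvCharF t xs := by
  induction xs using List.reverseRecOn with
  | nil => simp [pvPatch, pvCharF, pvLastIdx]
  | append_singleton xs y ih =>
    rw [show (xs ++ [y]).reverse = y :: xs.reverse by simp]
    unfold pvCharF
    rw [pvLastIdx_append_singleton]
    cases h : PySem.Chars.startswith y.1.toList ['R', 'u', 'l', 'e', 's'] with
    | true =>
      have hcond : PySem.Str.startswith y.1 "Rules" = true := by simp [h]
      rw [hcond]
      simp only [if_true]
      have hset : (xs ++ [y]).set xs.length (y.1, pvNewBody y.2 t) =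
          xs ++ [(y.1, pvNewBody y.2 t)] := by
        rw [List.set_append_right _ _ (Nat.le_refl _)]
        simp
      simp [pvPatch, h, pvPatch_true, hset]
    | false =>
      have hcond : PySem.Str.startswith y.1 "Rules" = false := by simp [h]
      rw [hcond]
      simp only [Bool.false_eq_true, if_false]
      have hstep : pvPatch t false (y :: xs.reverse) =
          (y :: (pvPatch t false xs.reverse).1, (pvPatch t false xs.reverse).2) := by
        simp [pvPatch, h]
      rw [hstep]
      simp only [List.reverse_cons]
      rw [ih]
      unfold pvCharF
      cases hL : pvLastIdx xs with
      | none => simp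
      | some j =>
        have hj := pvLastIdx_lt xs j hL
        have hset : ∀ v, (xs ++ [y]).set j v = xs.set j v ++ [y] := by
          intro v; rw [List.set_append_left _ _ hj]
        simp [hset, List.getElem?_append_left hj]

-- ===== VERDICT (by name: the statement is the Claim_ definition above) =====
theorem insert_additional_rule_spec : Claim_equal_insert_additional_rule := by
  intro sections t _
  unfold Spec_insert_additional_rule insert_additional_rule insert_additional_rule_alt
  rw [pvGoA_eq sections t sections.length (le_refl _)]
  simp only [List.take_length]
  rw [show sections.reverse.foldl (pvStepB t) ([], false)
        = ([] ++ (pvPatch t false sections.reverse).1, (pvPatch t false sections.reverse).2)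
      from foldl_eq_pvPatch t sections.reverse [] false]
  simp only [List.nil_append]
  rw [pvPatch_rev_char]
  unfold pvCharF
  cases pvLastIdx sections with
  | none => rfl
  | some j => simp
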